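-- pv_equiv track=rewrite | github.com/imankit1/leetcode | 3852-smallest-pair-with-different-frequencies/3852-smallest-pair-with-different-frequencies.py | minDistinctFreqPair
-- ===== SOURCE A (Python) =====
-- def minDistinctFreqPair(nums: list[int]) -> list[int]:
--     nums.sort()
--     n=len(nums)
--     if n==1:
--         return [-1,-1]
--     prev=nums[0]
--     cnt_current=0
--     for i in range(0, n):
--         if nums[i]!=prev and nums.count(prev)!=nums.count(nums[i]):
--             return [prev, nums[i]]
--     return [-1,-1]
-- ===== SOURCE B (Python) =====
-- def minDistinctFreqPair(nums: list[int]) -> list[int]: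
--     # B sorts nums in place like A (same observable mutation), then does ONE pass
--     # over the sorted list grouped into runs of equal values: the first run gives
--     # (v, c); the first later run whose length differs from c gives the answer.
--     nums.sort()
--     if len(nums) == 1:
--         return [-1, -1]
--     v = nums[0]
--     n = len(nums)
--     i = 0
--     while i < n and nums[i] == v:
--         i += 1
--     c = i
--     while i < n:
--         w = nums[i]
--         f = 0
--         while i < n and nums[i] == w:
--             f += 1
--             i += 1
--         if f != c:
--             return [v, w]
--     return [-1, -1]
-- ===== Notes on version B (the rewrite author's own statement) =====
-- stated objective: faster
-- what changed: B replaces A's nested nums.count scans with a single run-length pass over the sorted list: it measures each maximal run of equal values once and compares run lengths, never recounting; correct because sorting makes equal values contiguous, so a run length IS the frequency.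
import Mathlib
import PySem

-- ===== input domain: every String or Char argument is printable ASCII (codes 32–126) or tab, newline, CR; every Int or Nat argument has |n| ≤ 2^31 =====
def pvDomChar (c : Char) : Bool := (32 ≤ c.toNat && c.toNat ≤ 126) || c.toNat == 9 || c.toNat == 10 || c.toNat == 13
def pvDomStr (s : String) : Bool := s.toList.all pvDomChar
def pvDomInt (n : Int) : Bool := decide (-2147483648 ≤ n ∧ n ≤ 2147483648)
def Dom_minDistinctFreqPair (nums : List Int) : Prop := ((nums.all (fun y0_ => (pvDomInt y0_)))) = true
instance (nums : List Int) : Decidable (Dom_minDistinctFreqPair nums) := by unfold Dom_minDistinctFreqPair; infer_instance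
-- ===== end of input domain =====

-- B replaces A's repeated nums.count scans by a single run-length pass over the sorted list;
-- equivalence is about the RETURN value only (both Pythons sort nums in place, the same mutation).

-- ===== PORT A =====
-- for i in range(0, n): if nums[i]!=prev and nums.count(prev)!=nums.count(nums[i]): return [prev, nums[i]]
def pvALoop (s : List Int) (prev : Int) : List Int → List Int
  | [] => [-1, -1]
  | x :: rest =>
    if x ≠ prev ∧ PySem.List.count s prev ≠ PySem.List.count s x then [prev, x]
    else pvALoop s prev rest

def minDistinctFreqPair (nums : List Int) : List Int :=
  let s := PySem.List.sorted nums (fun x => x) false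
  let n := s.length
  if n == 1 then [-1, -1]
  else
    match PySem.List.pyGet? s 0 with
    | none => [-1, -1]   -- reading the first element of the empty list: Python raises IndexError; excluded by Pre_
    | some prev => pvALoop s prev s

-- ===== PORT B =====
-- 'while i < n and nums[i] == v: i += 1' : length of the leading run of v, and the suffix after it
def pvLeadRun (v : Int) : List Int → Nat × List Int
  | [] => (0, [])
  | x :: t => if x = v then ((pvLeadRun v t).1 + 1, (pvLeadRun v t).2) else (0, x :: t)

theorem pvLeadRun_len_le (v : Int) (l : List Int) : (pvLeadRun v l).2.length ≤ l.length := by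
  induction l with
  | nil => simp [pvLeadRun]
  | cons x t ih =>
    by_cases h : x = v
    · simp only [pvLeadRun, if_pos h]; exact le_trans ih (by simp)
    · simp [pvLeadRun, h]

-- outer 'while i < n' loop: one iteration per run of equal values
def pvBScan (v : Int) (c : Nat) : List Int → List Int
  | [] => [-1, -1]
  | w :: t =>
    if (pvLeadRun w t).1 + 1 ≠ c then [v, w]
    else pvBScan v c (pvLeadRun w t).2
  termination_by l => l.length
  decreasing_by exact Nat.lt_succ_of_le (pvLeadRun_len_le w t)

def minDistinctFreqPair_alt (nums : List Int) : List Int :=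
  let s := PySem.List.sorted nums (fun x => x) false
  if s.length == 1 then [-1, -1]
  else
    match PySem.List.pyGet? s 0 with
    | none => [-1, -1]   -- reading the first element of the empty list: Python raises IndexError; excluded by Pre_
    | some v =>
      let p := pvLeadRun v s       -- c = length of the leading run of v
      pvBScan v p.1 p.2

-- ===== PRECONDITION & SPEC =====
-- Pre_ excludes only the empty list, where both Pythons raise IndexError reading the first element.
def Pre_minDistinctFreqPair (nums : List Int) : Prop := nums ≠ []
instance (nums : List Int) : Decidable (Pre_minDistinctFreqPair nums) := by unfold Pre_minDistinctFreqPair; infer_instance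
def pvWitness_minDistinctFreqPair : List Int := [1, 2, 2]

def Spec_minDistinctFreqPair (nums : List Int) (out : List Int) : Prop := out = minDistinctFreqPair_alt nums
instance (nums : List Int) (out : List Int) : Decidable (Spec_minDistinctFreqPair nums out) := by unfold Spec_minDistinctFreqPair; infer_instance

-- ===== CLAIM (what is proved, stated in full; the proofs are below) =====
def Claim_equal_minDistinctFreqPair : Prop := ∀ (nums : List Int), Dom_minDistinctFreqPair nums → Pre_minDistinctFreqPair nums → Spec_minDistinctFreqPair nums (minDistinctFreqPair nums)

-- ===== LEMMAS AND PROOFS =====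

-- A's scan is a find? over the sorted list
theorem pvALoop_eq_find (s : List Int) (v : Int) (l : List Int) :
    pvALoop s v l =
      match l.find? (fun x => decide (x ≠ v) && decide (PySem.List.count s x ≠ PySem.List.count s v)) with
      | some x => [v, x]
      | none => [-1, -1] := by
  induction l with
  | nil => simp [pvALoop]
  | cons x rest ih =>
    by_cases h : x ≠ v ∧ PySem.List.count s v ≠ PySem.List.count s x
    · have hx2 : ¬ List.count x s = List.count v s := by
        simpa [PySem.List.count_eq] using (Ne.symm h.2)
      rw [pvALoop, if_pos h]
      simp [List.find?, h.1, hx2]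
    · rw [pvALoop, if_neg h, ih, List.find?]
      rcases not_and_or.mp h with h1 | h2
      · simp at h1; simp [h1]
      · simp at h2; simp [h2]

theorem find?_congr_mem {α : Type} (p q : α → Bool) (l : List α)
    (h : ∀ x ∈ l, p x = q x) : l.find? p = l.find? q := by
  induction l with
  | nil => rfl
  | cons x t ih =>
    rw [List.find?, List.find?, h x (by simp)]
    cases hq : q x
    · simp [ih (fun y hy => h y (by simp [hy]))]
    · simp

theorem pvLeadRun_cons_self (v : Int) (t : List Int) :
    pvLeadRun v (v :: t) = ((pvLeadRun v t).1 + 1, (pvLeadRun v t).2) := by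
  simp [pvLeadRun]

theorem pvLeadRun_cons_ne (v x : Int) (t : List Int) (h : ¬ x = v) :
    pvLeadRun v (x :: t) = (0, x :: t) := by
  simp [pvLeadRun, h]

-- pvLeadRun splits off the leading run: l = replicate (run length) v ++ rest
theorem pvLeadRun_append (v : Int) (l : List Int) :
    List.replicate (pvLeadRun v l).1 v ++ (pvLeadRun v l).2 = l := by
  induction l with
  | nil => simp [pvLeadRun]
  | cons x t ih =>
    by_cases h : x = v
    · subst h
      rw [pvLeadRun_cons_self, List.replicate_succ, List.cons_append]
      show _ :: (List.replicate (pvLeadRun x t).1 x ++ (pvLeadRun x t).2) = _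
      rw [ih]
    · simp [pvLeadRun_cons_ne v x t h]

theorem find?_replicate_none {α : Type} (p : α → Bool) (a : α) (n : Nat)
    (h : p a = false) : (List.replicate n a).find? p = none := by
  induction n with
  | zero => rfl
  | succ k ih => rw [List.replicate_succ, List.find?, h]; exact ih

theorem find?_skip {α : Type} (p : α → Bool) (m : Nat) (w : α) (r : List α)
    (hw : p w = false) : List.find? p (List.replicate m w ++ r) = List.find? p r := by
  rw [List.find?_append, find?_replicate_none p w m hw, Option.none_or]

-- pvLeadRun on a sorted list whose elements are all ≥ v: the run length is the count of v,
-- the rest is sorted, all of it is > v, and counts of other values are preserved.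
theorem pvLeadRun_sorted (v : Int) (l : List Int)
    (hs : l.Pairwise (· ≤ ·)) (hge : ∀ x ∈ l, v ≤ x) :
    (pvLeadRun v l).1 = l.count v ∧
    (∀ x ∈ (pvLeadRun v l).2, v < x) ∧
    (pvLeadRun v l).2.Pairwise (· ≤ ·) ∧
    (∀ w, w ≠ v → l.count w = (pvLeadRun v l).2.count w) := by
  induction l with
  | nil => simp [pvLeadRun]
  | cons x t ih =>
    rcases List.pairwise_cons.mp hs with ⟨hxall, hts⟩
    by_cases h : x = v
    · subst h
      obtain ⟨h1, h2, h3, h4⟩ := ih hts (fun y hy => hxall y hy)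
      refine ⟨?_, ?_, ?_, ?_⟩ <;> rw [pvLeadRun_cons_self]
      · simp [h1]
      · exact h2
      · exact h3
      · intro w hw
        rw [List.count_cons]
        simp [hw.symm, h4 w hw]
    · have hvx : v < x := lt_of_le_of_ne (hge x (by simp)) (Ne.symm h)
      have hgt : ∀ y ∈ x :: t, v < y := by
        intro y hy
        rcases List.mem_cons.mp hy with rfl | hy
        · exact hvx
        · exact lt_of_lt_of_le hvx (hxall y hy)
      refine ⟨?_, ?_, ?_, ?_⟩ <;> rw [pvLeadRun_cons_ne v x t h]
      · have : v ∉ x :: t := fun hm => lt_irrefl v (hgt v hm)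
        simp [List.count_eq_zero.mpr this]
      · exact hgt
      · exact hs
      · intro w _; rfl

-- pyGet? at index 0 returning some v means the list starts with v
theorem pvGet0_head {l : List Int} {v : Int} (h : PySem.List.pyGet? l 0 = some v) :
    ∃ t, l = v :: t := by
  cases l with
  | nil => simp [PySem.List.pyGet?, PySem.List.pyIdx?] at h
  | cons a t =>
    simp [PySem.List.pyGet?, PySem.List.pyIdx?] at h
    exact ⟨t, by rw [h]⟩

-- B's run scan on a sorted list finds the first value whose count differs from c
theorem pvBScan_eq_find (v : Int) (c : Nat) (r : List Int) (hs : r.Pairwise (· ≤ ·)) :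
    pvBScan v c r =
      match r.find? (fun w => decide (r.count w ≠ c)) with
      | some w => [v, w]
      | none => [-1, -1] := by
  induction hn : r.length using Nat.strong_induction_on generalizing r with
  | _ n ih =>
  cases r with
  | nil => simp [pvBScan]
  | cons w t =>
    rcases List.pairwise_cons.mp hs with ⟨hwall, hts⟩
    obtain ⟨h1, h2, h3, h4⟩ := pvLeadRun_sorted w t hts hwall
    have happ := pvLeadRun_append w t
    set m := (pvLeadRun w t).1 with hm
    set r' := (pvLeadRun w t).2 with hr'
    have hcount_w : (w :: t).count w = m + 1 := by
      simp [h1]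
    by_cases hf : m + 1 ≠ c
    · rw [pvBScan, if_pos hf]
      rw [List.find?_cons_of_pos (by simp [hcount_w]; exact hf)]
    · simp only [ne_eq, not_not] at hf
      rw [pvBScan, if_neg (by omega)]
      have hnp : ¬ ((w :: t).count w ≠ c) := by simp [hcount_w, hf]
      have ht : t = List.replicate m w ++ r' := happ.symm
      have hstep : List.find? (fun u => decide ((w :: t).count u ≠ c)) t
          = List.find? (fun u => decide (r'.count u ≠ c)) r' :=
        (congrArg (List.find? _) ht).trans
          ((find?_skip _ m w r' (decide_eq_false hnp)).trans
            (find?_congr_mem _ _ r' (by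
              intro u hu
              have huw : u ≠ w := ne_of_gt (h2 u hu)
              rw [List.count_cons]
              simp [Ne.symm huw, h4 u huw])))
      rw [List.find?_cons_of_neg (by simpa using hnp), hstep]
      have hn' : t.length + 1 = n := by simpa using hn
      exact ih r'.length (by
        have := pvLeadRun_len_le w t
        simp only [← hr'] at this
        omega) r' h3 rfl

-- ===== VERDICT (by name: the statement is the Claim_ definition above) =====
theorem minDistinctFreqPair_spec : Claim_equal_minDistinctFreqPair := by
  intro nums _ _
  show minDistinctFreqPair nums = minDistinctFreqPair_alt nums
  unfold minDistinctFreqPair minDistinctFreqPair_alt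
  set s := PySem.List.sorted nums (fun x => x) false with hsdef
  by_cases hlen : s.length == 1
  · simp [hlen]
  · simp only [hlen, if_false, Bool.false_eq_true]
    cases hget : PySem.List.pyGet? s 0 with
    | none => rfl
    | some v =>
      have hs : s.Pairwise (· ≤ ·) := by
        simpa using PySem.List.sorted_pairwise (xs := nums) (key := fun x => x)
      obtain ⟨t0, hst⟩ := pvGet0_head hget
      have hge : ∀ x ∈ s, v ≤ x := by
        intro x hx
        rw [hst] at hx hs
        rcases List.mem_cons.mp hx with rfl | hx
        · exact le_refl x
        · exact (List.pairwise_cons.mp hs).1 x hx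
      obtain ⟨h1, h2, h3, h4⟩ := pvLeadRun_sorted v s hs hge
      have happ := pvLeadRun_append v s
      set m := (pvLeadRun v s).1 with hm
      set r := (pvLeadRun v s).2 with hr
      show pvALoop s v s = pvBScan v m r
      rw [pvALoop_eq_find, pvBScan_eq_find v m r h3]
      -- A's find? over s = B's find? over r
      have hA : s.find? (fun x => decide (x ≠ v) && decide (PySem.List.count s x ≠ PySem.List.count s v)) =
          r.find? (fun w => decide (r.count w ≠ m)) := by
        have hsr : s = List.replicate m v ++ r := happ.symm
        rw [hsr, List.find?_append, find?_replicate_none _ _ _ (by simp)]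
        simp only [Option.none_or]
        apply find?_congr_mem
        intro u hu
        have huv : u ≠ v := ne_of_gt (h2 u hu)
        have hcu : s.count u = r.count u := h4 u huv
        rw [← hsr]
        simp [PySem.List.count_eq, huv, hcu, ← h1]
      rw [hA]
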